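-- pv_equiv track=rewrite | github.com/DeltaEcho3J/rsvp-reader | RSVP_Controls.py | highlight_paragraph
-- ===== SOURCE A (Python) =====
-- def highlight_paragraph(words, current_index):
--     styled_words = []
--
--     for i, word in enumerate(words):
--         if i ==current_index:
--             styled_words.append(f"<span style='color:red'>{word}</span>")
--         else:
--             styled_words.append(word)
--     return " ".join(styled_words)
-- ===== SOURCE B (Python) =====
-- def highlight_paragraph(words, current_index):
--     out = ""
--     for k in range(len(words) - 1, -1, -1):
--         w = words[k]
--         if k == current_index:
--             w = "<span style='color:red'>" + w + "</span>"
--         if k == len(words) - 1: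
--             out = w
--         else:
--             out = w + " " + out
--     return out
-- ===== Notes on version B (the rewrite author's own statement) =====
-- stated objective: alternative
-- what changed: Builds the result string directly back-to-front in a single reversed index loop with a string accumulator and inline separators, instead of A's forward enumerate loop that builds an intermediate styled list and space-joins it.
import Mathlib
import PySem

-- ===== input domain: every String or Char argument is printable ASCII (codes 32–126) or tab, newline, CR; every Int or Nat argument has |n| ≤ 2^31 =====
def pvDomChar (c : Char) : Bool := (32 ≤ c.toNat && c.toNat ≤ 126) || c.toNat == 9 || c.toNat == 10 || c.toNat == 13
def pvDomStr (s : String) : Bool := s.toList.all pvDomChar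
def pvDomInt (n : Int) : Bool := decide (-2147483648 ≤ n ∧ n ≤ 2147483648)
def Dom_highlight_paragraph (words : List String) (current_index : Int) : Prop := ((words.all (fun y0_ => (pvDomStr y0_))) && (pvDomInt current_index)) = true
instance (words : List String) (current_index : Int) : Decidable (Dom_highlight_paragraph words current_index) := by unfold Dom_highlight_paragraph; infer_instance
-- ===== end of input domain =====

-- B builds the result string directly back-to-front in one reversed index loop with a
-- string accumulator, instead of A's forward enumerate loop over an intermediate styled
-- list that is then space-joined (objective: alternative decomposition).

-- ===== PORT A =====
def highlight_paragraph (words : List String) (current_index : Int) : String :=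
  let styled_words : List String := []
  let styled_words :=
    (PySem.List.enumerate words).foldl
      (fun acc p =>
        if p.1 == current_index then
          acc ++ ["<span style='color:red'>" ++ p.2 ++ "</span>"]
        else
          acc ++ [p.2]) styled_words
  PySem.Str.join " " styled_words

-- ===== PORT B =====
def highlight_paragraph_alt (words : List String) (current_index : Int) : String :=
  (PySem.List.pyRange ((words.length : Int) - 1) (-1) (-1)).foldl
    (fun out k =>
      let w := PySem.List.pyGetD words k ""
      let w := if k == current_index then "<span style='color:red'>" ++ w ++ "</span>" else w
      if k == (words.length : Int) - 1 then w else w ++ " " ++ out)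
    ""

-- ===== PRECONDITION & SPEC =====
def Spec_highlight_paragraph (words : List String) (current_index : Int) (out : String) : Prop := out = highlight_paragraph_alt words current_index
instance (words : List String) (current_index : Int) (out : String) : Decidable (Spec_highlight_paragraph words current_index out) := by unfold Spec_highlight_paragraph; infer_instance

-- ===== CLAIM (what is proved, stated in full; the proofs are below) =====
def Claim_equal_highlight_paragraph : Prop := ∀ (words : List String) (current_index : Int), Dom_highlight_paragraph words current_index → Spec_highlight_paragraph words current_index (highlight_paragraph words current_index)

-- ===== LEMMAS AND PROOFS =====

-- the styled form of one word
def pvSpan (w : String) : String := "<span style='color:red'>" ++ w ++ "</span>"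

-- the element A produces for enumerated pair p
def pvStyle (ci : Int) (p : Int × String) : String :=
  if p.1 == ci then pvSpan p.2 else p.2

-- the styled list, computed structurally (the common reference point of both proofs)
def pvMapStyle : List String → Int → List String
  | [], _ => []
  | w :: ws, ci => (if ci == 0 then pvSpan w else w) :: pvMapStyle ws (ci - 1)

theorem pv_join_nil : PySem.Str.join " " [] = "" := by
  apply String.toList_injective
  simp [PySem.Str.join, PySem.Chars.join_nil]

theorem pv_join_singleton (x : String) : PySem.Str.join " " [x] = x := by
  apply String.toList_injective
  simp [PySem.Str.join, PySem.Chars.join_singleton]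

theorem pv_join_cons_cons (x y : String) (t : List String) :
    PySem.Str.join " " (x :: y :: t) = x ++ " " ++ PySem.Str.join " " (y :: t) := by
  apply String.toList_injective
  simp [PySem.Str.join, PySem.Chars.join_cons_cons]

theorem pv_enum_map (words : List String) (ci s : Int) :
    (PySem.List.enumerate words s).map (pvStyle ci) = pvMapStyle words (ci - s) := by
  induction words generalizing s with
  | nil => simp [PySem.List.enumerate_nil, pvMapStyle]
  | cons w ws ih =>
      rw [PySem.List.enumerate_cons]
      simp only [List.map_cons, pvMapStyle, pvStyle]
      have hcond : ((s == ci)) = ((ci - s == 0)) := by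
        by_cases h : s = ci
        · simp [h]
        · have : ¬ (ci - s = 0) := by omega
          simp [h, this]
      rw [hcond, ih (s + 1)]
      have : ci - s - 1 = ci - (s + 1) := by ring
      rw [this]

theorem pv_A (words : List String) (ci : Int) :
    highlight_paragraph words ci = PySem.Str.join " " (pvMapStyle words ci) := by
  unfold highlight_paragraph
  have hfun : (fun (acc : List String) (p : Int × String) =>
      if p.1 == ci then acc ++ ["<span style='color:red'>" ++ p.2 ++ "</span>"]
      else acc ++ [p.2])
      = fun acc p => acc ++ [pvStyle ci p] := by
    funext acc p
    by_cases hp : p.1 == ci <;> simp [pvStyle, pvSpan, hp]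
  simp only [hfun, PySem.List.foldl_append_singleton_eq_map]
  have := pv_enum_map words ci 0
  simp only [] at this ⊢
  rw [List.nil_append, this]
  norm_num

-- one loop step of B turns the joined styled suffix from j+1 into the one from j
theorem pv_step (words : List String) (ci : Int) (j : Nat) (hj : j < words.length) :
    (let w := PySem.List.pyGetD words (j : Int) ""
     let w := if (j : Int) == ci then "<span style='color:red'>" ++ w ++ "</span>" else w
     if (j : Int) == (words.length : Int) - 1 then w
     else w ++ " " ++ PySem.Str.join " " (pvMapStyle (words.drop (j + 1)) (ci - ((j : Int) + 1))))
    = PySem.Str.join " " (pvMapStyle (words.drop j) (ci - j)) := by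
  have hdrop : words.drop j = words[j] :: words.drop (j + 1) := List.drop_eq_getElem_cons hj
  have hget : PySem.List.pyGetD words (j : Int) "" = words[j] := by
    simp [PySem.List.pyGetD_ofNat _ _ _ hj]
  have hcond : (((j : Int) == ci)) = ((ci - (j : Int) == 0)) := by
    by_cases h : (j : Int) = ci
    · simp [h]
    · have : ¬ (ci - (j : Int) = 0) := by omega
      simp [h, this]
  rw [hdrop]
  simp only [pvMapStyle, pvSpan]
  by_cases hlast : j = words.length - 1
  · have hdone : words.drop (j + 1) = [] := by
      apply List.drop_eq_nil_of_le; omega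
    have hbeq : ((j : Int) == (words.length : Int) - 1) = true := by
      simp; omega
    rw [hdone]
    simp only [pvMapStyle, hbeq, if_true, hget, hcond, pv_join_singleton]
  · have hj1 : j + 1 < words.length := by omega
    have hdrop2 : words.drop (j + 1) = words[j + 1] :: words.drop (j + 2) :=
      List.drop_eq_getElem_cons hj1
    have hbeq : ((j : Int) == (words.length : Int) - 1) = false := by
      simp; omega
    have hsub : ci - (j : Int) - 1 = ci - ((j : Int) + 1) := by ring
    rw [hdrop2]
    simp only [pvMapStyle, hbeq, hget, hcond, hsub, pv_join_cons_cons]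
    simp

theorem pv_B_inv (words : List String) (ci : Int) (j : Nat) (hj : j ≤ words.length) :
    (PySem.List.pyRange ((j : Int) - 1) (-1) (-1)).foldl
      (fun out k =>
        let w := PySem.List.pyGetD words k ""
        let w := if k == ci then "<span style='color:red'>" ++ w ++ "</span>" else w
        if k == (words.length : Int) - 1 then w else w ++ " " ++ out)
      (PySem.Str.join " " (pvMapStyle (words.drop j) (ci - j)))
    = PySem.Str.join " " (pvMapStyle words ci) := by
  induction j with
  | zero =>
      rw [PySem.List.pyRange_neg_one_eq_nil (by norm_num : ((0 : Nat) : Int) - 1 ≤ -1)]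
      simp
  | succ j ih =>
      have hjlt : j < words.length := by omega
      have h1 : ((j + 1 : Nat) : Int) - 1 = (j : Int) := by push_cast; ring
      rw [h1, PySem.List.pyRange_neg_one_cons (by omega : (-1 : Int) < (j : Int)),
        List.foldl_cons]
      have hstep := pv_step words ci j hjlt
      have h2 : (ci - ((j + 1 : Nat) : Int)) = ci - ((j : Int) + 1) := by push_cast; ring
      rw [h2] at *
      simp only [] at hstep ⊢
      rw [hstep]
      exact ih (by omega)

theorem pv_B (words : List String) (ci : Int) :
    highlight_paragraph_alt words ci = PySem.Str.join " " (pvMapStyle words ci) := by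
  unfold highlight_paragraph_alt
  have := pv_B_inv words ci words.length le_rfl
  rw [List.drop_length] at this
  simp only [pvMapStyle, pv_join_nil] at this
  exact this

-- ===== VERDICT (by name: the statement is the Claim_ definition above) =====
theorem highlight_paragraph_spec : Claim_equal_highlight_paragraph := by
  intro words ci _
  unfold Spec_highlight_paragraph
  rw [pv_A, pv_B]
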